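-- pv_equiv track=rewrite | github.com/miliar/Code_Jam_Webscraper | solutions_python/Problem_200/725.py | anomaly_check
-- ===== SOURCE A (Python) =====
-- def anomaly_check(string):
--     position = -1
--     bool_anomaly = False
--     length = len(string)
--     if length == 1:
--         return(bool_anomaly, position)
--     for pos in range(1,length):
--         if string[length - pos] < string[length - pos - 1]:
--             bool_anomaly = True
--             position = length - pos
--             break
--     return(bool_anomaly, position)
-- ===== SOURCE B (Python) =====
-- def anomaly_check(string):
--     # Forward single pass keeping the LAST adjacent inversion index (same as A's rightmost).
--     found = False
--     position = -1
--     for i in range(1, len(string)):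
--         if string[i] < string[i - 1]:
--             found = True
--             position = i
--     return (found, position)
-- ===== Notes on version B (the rewrite author's own statement) =====
-- stated objective: simpler
-- what changed: A scans adjacent pairs from the right end and breaks at the first inversion; B makes one forward pass keeping the index of the last inversion seen (the same rightmost one) with no break and no index arithmetic.
import Mathlib
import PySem

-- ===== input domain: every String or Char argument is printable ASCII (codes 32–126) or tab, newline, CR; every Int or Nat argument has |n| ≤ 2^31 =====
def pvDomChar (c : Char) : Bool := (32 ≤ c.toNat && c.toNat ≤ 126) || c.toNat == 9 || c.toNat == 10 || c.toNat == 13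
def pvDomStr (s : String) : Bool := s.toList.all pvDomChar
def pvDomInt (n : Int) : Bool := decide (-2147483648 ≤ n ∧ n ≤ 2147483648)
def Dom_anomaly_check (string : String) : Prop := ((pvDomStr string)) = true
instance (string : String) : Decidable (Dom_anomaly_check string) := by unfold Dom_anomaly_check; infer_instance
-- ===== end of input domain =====

-- B replaces A's backward scan-with-break by a forward pass that keeps the last
-- adjacent inversion index (objective: simpler, same result).

-- ===== PORT A =====
-- A's backward loop with break: recursion over the remaining 'pos' values.
def pvLoopA (cs : List Char) (length : Int) : List Int → Bool × Int
  | [] => (false, -1)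
  | pos :: rest =>
    if PySem.List.pyGetD cs (length - pos) ' ' < PySem.List.pyGetD cs (length - pos - 1) ' ' then
      (true, length - pos)
    else pvLoopA cs length rest

def anomaly_check (string : String) : Bool × Int :=
  let length : Int := PySem.Str.len string
  if length == 1 then (false, -1)
  else pvLoopA string.toList length (PySem.List.pyRange 1 length 1)

-- ===== PORT B =====
def anomaly_check_alt (string : String) : Bool × Int :=
  let cs := string.toList
  (PySem.List.pyRange 1 (PySem.Str.len string) 1).foldl
    (fun acc i =>
      if PySem.List.pyGetD cs i ' ' < PySem.List.pyGetD cs (i - 1) ' ' then (true, i) else acc)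
    (false, -1)

-- ===== PRECONDITION & SPEC =====
def Spec_anomaly_check (string : String) (out : Bool × Int) : Prop := out = anomaly_check_alt string
instance (string : String) (out : Bool × Int) : Decidable (Spec_anomaly_check string out) := by unfold Spec_anomaly_check; infer_instance

-- ===== CLAIM (what is proved, stated in full; the proofs are below) =====
def Claim_equal_anomaly_check : Prop := ∀ (string : String), Dom_anomaly_check string → Spec_anomaly_check string (anomaly_check string)

-- ===== LEMMAS AND PROOFS =====

-- first index in the list satisfying P, as A's break-loop returns it
def pvFirstM (P : Int → Bool) : List Int → Bool × Int
  | [] => (false, -1)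
  | x :: xs => if P x then (true, x) else pvFirstM P xs

theorem pvFirstM_not_found (P : Int → Bool) (l : List Int)
    (h : (pvFirstM P l).1 = false) : pvFirstM P l = (false, -1) := by
  induction l with
  | nil => rfl
  | cons x xs ih =>
    by_cases hx : P x
    · simp [pvFirstM, hx] at h
    · simpa [pvFirstM, hx] using ih (by simpa [pvFirstM, hx] using h)

theorem pvFirstM_append_singleton (P : Int → Bool) (xs : List Int) (a : Int) :
    pvFirstM P (xs ++ [a]) =
      if (pvFirstM P xs).1 then pvFirstM P xs
      else if P a then (true, a) else (false, -1) := by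
  induction xs with
  | nil => simp [pvFirstM]
  | cons x t ih =>
    by_cases hx : P x <;> simp [pvFirstM, hx, ih]

theorem pvFoldl_eq_firstM_reverse (P : Int → Bool) (l : List Int) (init : Bool × Int) :
    l.foldl (fun acc i => if P i then (true, i) else acc) init =
      if (pvFirstM P l.reverse).1 then pvFirstM P l.reverse else init := by
  induction l generalizing init with
  | nil => simp [pvFirstM]
  | cons a t ih =>
    rw [List.foldl_cons, ih]
    rw [List.reverse_cons, pvFirstM_append_singleton]
    rcases h : (pvFirstM P t.reverse).1 with _ | _
    · by_cases ha : P a <;> simp [ha]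
    · simp [h]

theorem pvLoopA_eq_firstM (cs : List Char) (n : Int) (l : List Int) :
    pvLoopA cs n l =
      pvFirstM (fun j => decide (PySem.List.pyGetD cs j ' ' < PySem.List.pyGetD cs (j - 1) ' '))
        (l.map (fun p => n - p)) := by
  induction l with
  | nil => rfl
  | cons p t ih =>
    by_cases h : PySem.List.pyGetD cs (n - p) ' ' < PySem.List.pyGetD cs (n - p - 1) ' ' <;>
      simp [pvLoopA, pvFirstM, h, ih]

theorem pvMap_sub_pyRange (n : Int) :
    (PySem.List.pyRange 1 n 1).map (fun p => n - p) = (PySem.List.pyRange 1 n 1).reverse := by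
  have h1 : PySem.List.pyRange (n - 1) 0 (-1) = (PySem.List.pyRange 1 n 1).reverse := by
    have := PySem.List.pyRange_neg_one_eq_reverse (n - 1) 0
    simpa using this
  rw [← h1, PySem.List.pyRange_neg_one, PySem.List.pyRange_one, List.map_map]
  have : (n - 1 - 0).toNat = (n - 1).toNat := by omega
  rw [this]
  apply List.map_congr_left
  intro k _
  simp [Function.comp]
  omega

theorem pv_ports_agree (string : String) : anomaly_check string = anomaly_check_alt string := by
  unfold anomaly_check anomaly_check_alt
  set cs := string.toList with hcs
  set n : Int := PySem.Str.len string with hn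
  set P : Int → Bool :=
    fun j => decide (PySem.List.pyGetD cs j ' ' < PySem.List.pyGetD cs (j - 1) ' ') with hP
  have hB : (PySem.List.pyRange 1 n 1).foldl
      (fun acc i =>
        if PySem.List.pyGetD cs i ' ' < PySem.List.pyGetD cs (i - 1) ' ' then (true, i) else acc)
      (false, -1) =
      if (pvFirstM P (PySem.List.pyRange 1 n 1).reverse).1 then
        pvFirstM P (PySem.List.pyRange 1 n 1).reverse else (false, -1) := by
    have := pvFoldl_eq_firstM_reverse P (PySem.List.pyRange 1 n 1) (false, -1)
    simpa [hP] using this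
  have hA : pvLoopA cs n (PySem.List.pyRange 1 n 1) =
      pvFirstM P (PySem.List.pyRange 1 n 1).reverse := by
    rw [pvLoopA_eq_firstM, pvMap_sub_pyRange]
  by_cases h1 : n == 1
  · have hn1 : n = 1 := by simpa using h1
    simp only [h1, if_true]
    rw [hB]
    have : PySem.List.pyRange 1 n 1 = [] := PySem.List.pyRange_one_eq_nil (by omega)
    simp [this, pvFirstM]
  · simp only [h1, Bool.false_eq_true, if_false]
    rw [hB, ← hA]
    rcases hf : (pvLoopA cs n (PySem.List.pyRange 1 n 1)).1 with _ | _
    · rw [hA] at hf ⊢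
      simp [pvFirstM_not_found P _ hf]
    · rw [hA] at hf ⊢
      simp only [if_true]

-- ===== VERDICT (by name: the statement is the Claim_ definition above) =====
theorem anomaly_check_spec : Claim_equal_anomaly_check := by
  intro string _
  exact pv_ports_agree string
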